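-- pv_equiv track=rewrite | github.com/lchebib/SeeQoolPlaces | PyParse/VerifyKeyReferences.py | allReferenceKeysExist
-- ===== SOURCE A (Python) =====
-- def allReferenceKeysExist(referenceTable, referenceKeyIndexes, foreignKeys):
--     for row in referenceTable:
--         if foreignKeys[0].lower() == row[int(referenceKeyIndexes[0])].lower():
--             allKeysGood = True
--             if len(foreignKeys) > 1:
--                 for i in range(1, len(foreignKeys)):
--                     if foreignKeys[i].lower() != row[int(referenceKeyIndexes[i])].lower():
--                         allKeysGood = False
--             if allKeysGood:
--                 return True
--     return False
-- ===== SOURCE B (Python) =====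
-- def allReferenceKeysExist(referenceTable, referenceKeyIndexes, foreignKeys):
--     if not referenceTable:
--         return False
--     idxs = [int(referenceKeyIndexes[i]) for i in range(len(foreignKeys))]
--     index = {tuple(row[j].lower() for j in idxs) for row in referenceTable}
--     return tuple(fk.lower() for fk in foreignKeys) in index
-- ===== Notes on version B (the rewrite author's own statement) =====
-- stated objective: idiomatic
-- what changed: Replaces the row-by-row scan with inner flag loop by building the lowered key tuple of every reference row into a set once and testing the lowered foreign-key tuple by a single membership lookup.
-- outside the precondition, e.g. on allReferenceKeysExist([['a', 'b']], ['0', '9'], ['x', 'y']): A returns False, B raises IndexError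
import Mathlib
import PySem

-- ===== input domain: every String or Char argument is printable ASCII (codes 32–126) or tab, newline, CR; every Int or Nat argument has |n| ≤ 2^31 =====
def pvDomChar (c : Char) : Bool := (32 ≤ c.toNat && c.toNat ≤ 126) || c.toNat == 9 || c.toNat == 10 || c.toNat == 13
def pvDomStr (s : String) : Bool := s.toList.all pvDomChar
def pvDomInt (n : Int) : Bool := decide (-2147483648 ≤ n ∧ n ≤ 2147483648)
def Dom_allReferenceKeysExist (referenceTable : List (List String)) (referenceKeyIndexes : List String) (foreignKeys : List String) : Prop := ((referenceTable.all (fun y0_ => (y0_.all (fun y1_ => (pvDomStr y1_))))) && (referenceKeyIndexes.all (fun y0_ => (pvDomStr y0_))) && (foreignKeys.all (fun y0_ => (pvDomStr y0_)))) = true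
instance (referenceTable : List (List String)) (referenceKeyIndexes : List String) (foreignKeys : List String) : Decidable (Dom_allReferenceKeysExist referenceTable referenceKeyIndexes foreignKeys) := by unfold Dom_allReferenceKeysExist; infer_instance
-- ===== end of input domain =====

-- B replaces A's row-by-row scan (with an inner all-keys flag loop) by building a set of each
-- row's lowered key tuple once and doing a single membership lookup (idiomatic; not measured faster).

-- ===== PORT A =====
-- the parsed key index at position i: int(referenceKeyIndexes[i]); none = raise
def pvKeyIdx? (referenceKeyIndexes : List String) (i : Int) : Option Int :=
  (PySem.List.pyGet? referenceKeyIndexes i).bind PySem.Int.ofStr?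

-- inner loop 'for i in range(1, len(foreignKeys))' maintaining allKeysGood; option failure
-- (a raise in Python) yields false, which is never reached inside Pre_
def pvAInner (row referenceKeyIndexes foreignKeys : List String) : Bool :=
  (PySem.List.pyRange 1 (foreignKeys.length : Int) 1).foldl (fun acc i =>
    match PySem.List.pyGet? foreignKeys i, pvKeyIdx? referenceKeyIndexes i with
    | some fki, some k =>
      match PySem.List.pyGet? row k with
      | some cell => if PySem.Str.lower fki ≠ PySem.Str.lower cell then false else acc
      | none => false
    | _, _ => false) true

-- the 'for row in referenceTable' loop with its early return
def pvARows (referenceKeyIndexes foreignKeys : List String) : List (List String) → Bool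
  | [] => false
  | row :: rest =>
    match PySem.List.pyGet? foreignKeys 0, pvKeyIdx? referenceKeyIndexes 0 with
    | some fk0, some k0 =>
      match PySem.List.pyGet? row k0 with
      | some cell0 =>
        if PySem.Str.lower fk0 = PySem.Str.lower cell0 then
          let allKeysGood := if foreignKeys.length > 1 then pvAInner row referenceKeyIndexes foreignKeys else true
          if allKeysGood then true else pvARows referenceKeyIndexes foreignKeys rest
        else pvARows referenceKeyIndexes foreignKeys rest
      | none => false
    | _, _ => false

def allReferenceKeysExist (referenceTable : List (List String)) (referenceKeyIndexes : List String) (foreignKeys : List String) : Bool :=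
  pvARows referenceKeyIndexes foreignKeys referenceTable

-- ===== PORT B =====
-- idxs = [int(referenceKeyIndexes[i]) for i in range(len(foreignKeys))]; none = raise
def pvBIdxs (referenceKeyIndexes : List String) : List Int → Option (List Int)
  | [] => some []
  | i :: rest =>
    match pvKeyIdx? referenceKeyIndexes i, pvBIdxs referenceKeyIndexes rest with
    | some k, some ks => some (k :: ks)
    | _, _ => none

-- tuple(row[j].lower() for j in idxs); none = raise
def pvBKey (row : List String) : List Int → Option (List String)
  | [] => some []
  | j :: rest =>
    match PySem.List.pyGet? row j, pvBKey row rest with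
    | some cell, some ks => some (PySem.Str.lower cell :: ks)
    | _, _ => none

-- the keys of all rows, in table order (the set comprehension's iteration)
def pvBKeys (idxs : List Int) : List (List String) → Option (List (List String))
  | [] => some []
  | row :: rest =>
    match pvBKey row idxs, pvBKeys idxs rest with
    | some k, some ks => some (k :: ks)
    | _, _ => none

def allReferenceKeysExist_alt (referenceTable : List (List String)) (referenceKeyIndexes : List String) (foreignKeys : List String) : Bool :=
  if referenceTable = [] then false
  else match pvBIdxs referenceKeyIndexes (PySem.List.pyRange 0 (foreignKeys.length : Int) 1) with
  | none => false
  | some idxs =>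
    match pvBKeys idxs referenceTable with
    | none => false
    | some keys =>
      PySem.Set.contains (PySem.Set.ofList keys) (foreignKeys.map PySem.Str.lower)

-- ===== PRECONDITION & SPEC =====
-- On a non-empty table, Pre_ excludes empty foreignKeys (A raises IndexError) and inputs where some
-- key index among the first len(foreignKeys) fails to parse or is out of range for some row: A checks
-- those lazily (only on rows reached whose first key matches) and may still return an ordinary value
-- there, while B builds the whole index eagerly and raises.
def Pre_allReferenceKeysExist (referenceTable : List (List String)) (referenceKeyIndexes : List String) (foreignKeys : List String) : Prop :=
  referenceTable = [] ∨
  (foreignKeys ≠ [] ∧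
    ∀ i ∈ List.range foreignKeys.length,
      ∃ k ∈ (pvKeyIdx? referenceKeyIndexes (i : Int)).toList,
        ∀ row ∈ referenceTable, -(row.length : Int) ≤ k ∧ k < (row.length : Int))
instance (referenceTable : List (List String)) (referenceKeyIndexes : List String) (foreignKeys : List String) : Decidable (Pre_allReferenceKeysExist referenceTable referenceKeyIndexes foreignKeys) := by unfold Pre_allReferenceKeysExist; infer_instance

def pvWitness_allReferenceKeysExist : List (List String) × List String × List String :=
  ([["A", "b"], ["c", "d"]], ["0", "1"], ["a", "B"])

def Spec_allReferenceKeysExist (referenceTable : List (List String)) (referenceKeyIndexes : List String) (foreignKeys : List String) (out : Bool) : Prop := out = allReferenceKeysExist_alt referenceTable referenceKeyIndexes foreignKeys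
instance (referenceTable : List (List String)) (referenceKeyIndexes : List String) (foreignKeys : List String) (out : Bool) : Decidable (Spec_allReferenceKeysExist referenceTable referenceKeyIndexes foreignKeys out) := by unfold Spec_allReferenceKeysExist; infer_instance

-- ===== CLAIM (what is proved, stated in full; the proofs are below) =====
def Claim_equal_allReferenceKeysExist : Prop := ∀ (referenceTable : List (List String)) (referenceKeyIndexes : List String) (foreignKeys : List String), Dom_allReferenceKeysExist referenceTable referenceKeyIndexes foreignKeys → Pre_allReferenceKeysExist referenceTable referenceKeyIndexes foreignKeys → Spec_allReferenceKeysExist referenceTable referenceKeyIndexes foreignKeys (allReferenceKeysExist referenceTable referenceKeyIndexes foreignKeys)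

-- ===== LEMMAS AND PROOFS =====

-- proof-side abbreviations: the (total) parsed index and cell, valid under Pre_
def pvGD (rki : List String) (i : Int) : Int := (pvKeyIdx? rki i).getD 0
def pvCellD (row : List String) (k : Int) : String := (PySem.List.pyGet? row k).getD ""

theorem pvBIdxs_eq (rki : List String) (l : List Int)
    (h : ∀ i ∈ l, (pvKeyIdx? rki i).isSome) :
    pvBIdxs rki l = some (l.map (pvGD rki)) := by
  induction l with
  | nil => rfl
  | cons i rest ih =>
    obtain ⟨k, hk⟩ := Option.isSome_iff_exists.mp (h i (List.mem_cons_self))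
    simp only [pvBIdxs, hk, ih (fun j hj => h j (List.mem_cons_of_mem _ hj)),
      List.map_cons, pvGD, Option.getD_some]

theorem pvBKey_eq (row : List String) (idxs : List Int)
    (h : ∀ j ∈ idxs, (PySem.List.pyGet? row j).isSome) :
    pvBKey row idxs = some (idxs.map (fun j => PySem.Str.lower (pvCellD row j))) := by
  induction idxs with
  | nil => rfl
  | cons j rest ih =>
    obtain ⟨c, hc⟩ := Option.isSome_iff_exists.mp (h j (List.mem_cons_self))
    simp only [pvBKey, hc, ih (fun x hx => h x (List.mem_cons_of_mem _ hx)),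
      List.map_cons, pvCellD, Option.getD_some]

theorem pvBKeys_eq (idxs : List Int) (rt : List (List String)) (keyf : List String → List String)
    (h : ∀ row ∈ rt, pvBKey row idxs = some (keyf row)) :
    pvBKeys idxs rt = some (rt.map keyf) := by
  induction rt with
  | nil => rfl
  | cons row rest ih =>
    simp only [pvBKeys, h row (List.mem_cons_self),
      ih (fun r hr => h r (List.mem_cons_of_mem _ hr)), List.map_cons]

-- A's per-row inner check as a single Bool predicate on the loop index
def pvHA (row rki fk : List String) (i : Int) : Bool :=
  match PySem.List.pyGet? fk i, pvKeyIdx? rki i with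
  | some fki, some k =>
    match PySem.List.pyGet? row k with
    | some cell => PySem.Str.lower fki == PySem.Str.lower cell
    | none => false
  | _, _ => false

theorem pvAInner_foldl (row rki fk : List String) (l : List Int) (b : Bool) :
    l.foldl (fun acc i =>
      match PySem.List.pyGet? fk i, pvKeyIdx? rki i with
      | some fki, some k =>
        match PySem.List.pyGet? row k with
        | some cell => if PySem.Str.lower fki ≠ PySem.Str.lower cell then false else acc
        | none => false
      | _, _ => false) b = (b && l.all (pvHA row rki fk)) := by
  induction l generalizing b with
  | nil => simp
  | cons i rest ih =>
    rw [List.foldl_cons, ih, List.all_cons, ← Bool.and_assoc]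
    have hbody : ∀ (o1 : Option String) (o2 : Option Int),
        (match o1, o2 with
          | some fki, some k =>
            match PySem.List.pyGet? row k with
            | some cell => if PySem.Str.lower fki ≠ PySem.Str.lower cell then false else b
            | none => false
          | _, _ => false)
          = (b && match o1, o2 with
              | some fki, some k =>
                match PySem.List.pyGet? row k with
                | some cell => PySem.Str.lower fki == PySem.Str.lower cell
                | none => false
              | _, _ => false) := by
      intro o1 o2
      rcases o1 with _ | fki
      · simp
      rcases o2 with _ | k
      · simp
      rcases hrk : PySem.List.pyGet? row k with _ | cell <;> simp [hrk]
      by_cases h : PySem.Str.lower fki = PySem.Str.lower cell <;> simp [h, Bool.and_comm]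
    congr 1
    unfold pvHA
    exact hbody (PySem.List.pyGet? fk i) (pvKeyIdx? rki i)

theorem pvAInner_eq (row rki fk : List String) :
    pvAInner row rki fk = (PySem.List.pyRange 1 (fk.length : Int) 1).all (pvHA row rki fk) := by
  rw [pvAInner, pvAInner_foldl, Bool.true_and]

-- the allKeysGood guard collapses: for a single key the inner range is empty
theorem pvGuard_eq (row rki : List String) (f0 : String) (fs : List String) :
    (if (f0 :: fs).length > 1 then pvAInner row rki (f0 :: fs) else true) =
      pvAInner row rki (f0 :: fs) := by
  cases fs with
  | nil =>
    simp only [List.length_cons, List.length_nil, pvAInner_eq]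
    rw [PySem.List.pyRange_one_eq_nil (by norm_num)]
    simp
  | cons g gs => simp

-- A's row scan is an 'any' over per-row matches, given the accesses it makes succeed
theorem pvARows_any (rki : List String) (f0 : String) (fs : List String) (k0 : Int)
    (hk0 : pvKeyIdx? rki 0 = some k0) (rt : List (List String))
    (h : ∀ row ∈ rt, (PySem.List.pyGet? row k0).isSome) :
    pvARows rki (f0 :: fs) rt =
      rt.any (fun row =>
        (PySem.Str.lower f0 == PySem.Str.lower (pvCellD row k0)) &&
          pvAInner row rki (f0 :: fs)) := by
  induction rt with
  | nil => rfl
  | cons row rest ih =>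
    obtain ⟨c, hc⟩ := Option.isSome_iff_exists.mp (h row (List.mem_cons_self))
    have hcd : pvCellD row k0 = c := by simp [pvCellD, hc]
    simp only [pvARows, PySem.List.pyGet?_zero_cons, hk0, hc,
      ih (fun r hr => h r (List.mem_cons_of_mem _ hr)), List.any_cons, hcd, pvGuard_eq]
    by_cases he : PySem.Str.lower f0 = PySem.Str.lower c <;>
      cases hi : pvAInner row rki (f0 :: fs) <;> simp [he]

-- per-row: A's check (head key plus inner loop) succeeds iff the row's lowered key tuple
-- equals the lowered foreign-key tuple
theorem pvRow_key_eq (rki : List String) (f0 : String) (fs : List String) (k0 : Int)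
    (hk0 : pvKeyIdx? rki 0 = some k0) (row : List String)
    (hs : ∀ i ∈ PySem.List.pyRange 0 (((f0 :: fs).length : Int)) 1, (pvKeyIdx? rki i).isSome)
    (hr : ∀ i ∈ PySem.List.pyRange 0 (((f0 :: fs).length : Int)) 1,
      (PySem.List.pyGet? row (pvGD rki i)).isSome) :
    ((PySem.Str.lower f0 == PySem.Str.lower (pvCellD row k0)) &&
        pvAInner row rki (f0 :: fs)) = true ↔
      ((PySem.List.pyRange 0 (((f0 :: fs).length : Int)) 1).map (pvGD rki)).map
          (fun j => PySem.Str.lower (pvCellD row j)) = (f0 :: fs).map PySem.Str.lower := by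
  have hn : (0 : Int) < ((f0 :: fs).length : Int) := by simp
  have hgd0 : pvGD rki 0 = k0 := by simp [pvGD, hk0]
  have hdrop : (PySem.List.pyRange 1 (((f0 :: fs).length : Int)) 1).map
      (fun j => PySem.List.pyGetD (f0 :: fs) j "") = fs := by
    have := PySem.List.map_pyGetD_pyRange (xs := f0 :: fs) (a := 1) (d := "") (by norm_num)
    simpa using this
  have htailmap : fs.map PySem.Str.lower =
      (PySem.List.pyRange 1 (((f0 :: fs).length : Int)) 1).map
        (fun j => PySem.Str.lower (PySem.List.pyGetD (f0 :: fs) j "")) := by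
    conv_lhs => rw [← hdrop]
    simp [List.map_map, Function.comp]
  have hfsmap : (f0 :: fs).map PySem.Str.lower =
      PySem.Str.lower f0 :: (PySem.List.pyRange 1 (((f0 :: fs).length : Int)) 1).map
        (fun j => PySem.Str.lower (PySem.List.pyGetD (f0 :: fs) j "")) := by
    rw [List.map_cons, htailmap]
  rw [List.map_map, PySem.List.pyRange_one_cons hn]
  have h01 : (0 : Int) + 1 = 1 := by norm_num
  rw [h01, List.map_cons, hfsmap, List.cons_eq_cons]
  rw [pvAInner_eq, Bool.and_eq_true, List.all_eq_true, beq_iff_eq]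
  have hmem01 : ∀ i : Int, i ∈ PySem.List.pyRange 1 (((f0 :: fs).length : Int)) 1 →
      i ∈ PySem.List.pyRange 0 (((f0 :: fs).length : Int)) 1 := by
    intro i hi
    rw [PySem.List.mem_pyRange_one] at hi ⊢
    omega
  constructor
  · rintro ⟨hhead, hall⟩
    refine ⟨by simp [Function.comp, hgd0, hhead], ?_⟩
    rw [List.map_inj_left]
    intro i hi
    obtain ⟨ki, hki⟩ := Option.isSome_iff_exists.mp (hs i (hmem01 i hi))
    have hgdi : pvGD rki i = ki := by simp [pvGD, hki]
    obtain ⟨ci, hci⟩ := Option.isSome_iff_exists.mp (hr i (hmem01 i hi))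
    have hfk : ∃ fki, PySem.List.pyGet? (f0 :: fs) i = some fki := by
      rw [← Option.isSome_iff_exists, Option.isSome_iff_ne_none, Ne,
        PySem.List.pyGet?_eq_none_iff]
      rw [PySem.List.mem_pyRange_one] at hi
      simp only [PySem.Raise.InRange, not_not]
      omega
    obtain ⟨fki, hfki⟩ := hfk
    have hha := hall i hi
    rw [hgdi] at hci
    simp only [pvHA, hfki, hki, hci, beq_iff_eq] at hha
    simp only [Function.comp_apply, hgdi, pvCellD, hci, Option.getD_some]
    rw [show PySem.List.pyGetD (f0 :: fs) i "" = fki from by simp [PySem.List.pyGetD, hfki]]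
    exact hha.symm
  · rintro ⟨hhead, htail⟩
    rw [List.map_inj_left] at htail
    refine ⟨by simpa [Function.comp, hgd0] using hhead.symm, ?_⟩
    intro i hi
    obtain ⟨ki, hki⟩ := Option.isSome_iff_exists.mp (hs i (hmem01 i hi))
    have hgdi : pvGD rki i = ki := by simp [pvGD, hki]
    obtain ⟨ci, hci⟩ := Option.isSome_iff_exists.mp (hr i (hmem01 i hi))
    have hfk : ∃ fki, PySem.List.pyGet? (f0 :: fs) i = some fki := by
      rw [← Option.isSome_iff_exists, Option.isSome_iff_ne_none, Ne,
        PySem.List.pyGet?_eq_none_iff]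
      rw [PySem.List.mem_pyRange_one] at hi
      simp only [PySem.Raise.InRange, not_not]
      omega
    obtain ⟨fki, hfki⟩ := hfk
    have hti := htail i hi
    rw [hgdi] at hci
    simp only [Function.comp_apply, hgdi, pvCellD, hci, Option.getD_some] at hti
    rw [show PySem.List.pyGetD (f0 :: fs) i "" = fki from by simp [PySem.List.pyGetD, hfki]] at hti
    simp [pvHA, hfki, hki, hci, hti]

-- ===== VERDICT (by name: the statements are the Claim_ definitions above) =====
theorem allReferenceKeysExist_spec : Claim_equal_allReferenceKeysExist := by
  intro rt rki fk _dom hpre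
  unfold Spec_allReferenceKeysExist allReferenceKeysExist allReferenceKeysExist_alt
  by_cases hrt : rt = []
  · subst hrt
    simp [pvARows]
  rcases hpre with h | ⟨hfk, h2⟩
  · exact absurd h hrt
  rw [if_neg hrt]
  cases fk with
  | nil => exact absurd rfl hfk
  | cons f0 fs =>
    -- every parsed index exists
    have hsome : ∀ i ∈ PySem.List.pyRange 0 (((f0 :: fs).length : Int)) 1,
        (pvKeyIdx? rki i).isSome := by
      intro i hi
      rw [PySem.List.mem_pyRange_one] at hi
      obtain ⟨k, hk, -⟩ := h2 i.toNat (by rw [List.mem_range]; omega)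
      rw [Int.toNat_of_nonneg hi.1] at hk
      simp only [Option.mem_toList] at hk
      simp [hk]
    -- each parsed index is in range for every row
    have hrange : ∀ row ∈ rt, ∀ i ∈ PySem.List.pyRange 0 (((f0 :: fs).length : Int)) 1,
        (PySem.List.pyGet? row (pvGD rki i)).isSome := by
      intro row hrow i hi
      rw [PySem.List.mem_pyRange_one] at hi
      obtain ⟨k, hk, hb⟩ := h2 i.toNat (by rw [List.mem_range]; omega)
      rw [Int.toNat_of_nonneg hi.1] at hk
      simp only [Option.mem_toList] at hk
      have hgd : pvGD rki i = k := by simp [pvGD, hk]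
      obtain ⟨hb1, hb2⟩ := hb row hrow
      rw [hgd, Option.isSome_iff_ne_none, Ne, PySem.List.pyGet?_eq_none_iff]
      simp only [PySem.Raise.InRange]
      omega
    have hkeyf : ∀ row ∈ rt,
        pvBKey row ((PySem.List.pyRange 0 (((f0 :: fs).length : Int)) 1).map (pvGD rki)) =
          some (((PySem.List.pyRange 0 (((f0 :: fs).length : Int)) 1).map (pvGD rki)).map
            (fun j => PySem.Str.lower (pvCellD row j))) := by
      intro row hrow
      refine pvBKey_eq row _ ?_
      intro j hj
      rw [List.mem_map] at hj
      obtain ⟨i, hi, rfl⟩ := hj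
      exact hrange row hrow i hi
    simp only [pvBIdxs_eq rki _ hsome, pvBKeys_eq _ rt _ hkeyf]
    -- k0 for the head position
    have h0mem : (0 : Int) ∈ PySem.List.pyRange 0 (((f0 :: fs).length : Int)) 1 := by
      rw [PySem.List.mem_pyRange_one]
      constructor <;> simp
    obtain ⟨k0, hk0⟩ := Option.isSome_iff_exists.mp (hsome 0 h0mem)
    have hgd0 : pvGD rki 0 = k0 := by simp [pvGD, hk0]
    rw [pvARows_any rki f0 fs k0 hk0 rt
      (fun row hrow => by rw [← hgd0]; exact hrange row hrow 0 h0mem)]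
    -- both sides are an existential over rows; compare per row
    have hcontains : ∀ (keys : List (List String)) (x : List String),
        (PySem.Set.ofList keys).contains x = decide (x ∈ keys) := by
      intro keys x
      simp [PySem.Set.contains]
    rw [hcontains, Bool.eq_iff_iff, List.any_eq_true, decide_eq_true_eq, List.mem_map]
    constructor
    · rintro ⟨row, hrow, hmatch⟩
      exact ⟨row, hrow, (pvRow_key_eq rki f0 fs k0 hk0 row hsome (hrange row hrow)).mp hmatch⟩
    · rintro ⟨row, hrow, hkey⟩
      exact ⟨row, hrow, (pvRow_key_eq rki f0 fs k0 hk0 row hsome (hrange row hrow)).mpr hkey⟩
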